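-- pv_equiv track=rewrite | github.com/jjyjoy1/Meta_Novelty | Two_Phase_Metagenomics/scripts/filter_contigs.py | has_potential_orf
-- ===== SOURCE A (Python) =====
-- def has_potential_orf(sequence, min_orf_length=300):
--     """Check if sequence has potential open reading frames"""
--     sequence = sequence.upper()
--
--     # Start and stop codons
--     start_codons = ['ATG', 'GTG', 'TTG']
--     stop_codons = ['TAA', 'TAG', 'TGA']
--
--     # Check all 6 reading frames
--     for frame in range(3):
--         # Forward strand
--         for start_pos in range(frame, len(sequence) - 2, 3):
--             codon = sequence[start_pos:start_pos + 3]
--             if len(codon) == 3 and codon in start_codons: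
--                 # Look for stop codon
--                 for stop_pos in range(start_pos + 3, len(sequence) - 2, 3):
--                     stop_codon = sequence[stop_pos:stop_pos + 3]
--                     if len(stop_codon) == 3 and stop_codon in stop_codons:
--                         orf_length = stop_pos - start_pos
--                         if orf_length >= min_orf_length:
--                             return True
--                         break
--
--         # Reverse strand
--         rev_sequence = reverse_complement(sequence)
--         for start_pos in range(frame, len(rev_sequence) - 2, 3):
--             codon = rev_sequence[start_pos:start_pos + 3]
--             if len(codon) == 3 and codon in start_codons:
--                 # Look for stop codon
--                 for stop_pos in range(start_pos + 3, len(rev_sequence) - 2, 3):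
--                     stop_codon = rev_sequence[stop_pos:stop_pos + 3]
--                     if len(stop_codon) == 3 and stop_codon in stop_codons:
--                         orf_length = stop_pos - start_pos
--                         if orf_length >= min_orf_length:
--                             return True
--                         break
--
--     return False
--
-- def reverse_complement(sequence):
--     """Get reverse complement of DNA sequence"""
--     complement = {'A': 'T', 'T': 'A', 'G': 'C', 'C': 'G', 'N': 'N'}
--     return ''.join(complement.get(base, 'N') for base in reversed(sequence))
-- ===== SOURCE B (Python) =====
-- def reverse_complement(sequence):
--     """Get reverse complement of DNA sequence"""
--     complement = {'A': 'T', 'T': 'A', 'G': 'C', 'C': 'G', 'N': 'N'}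
--     return ''.join(complement.get(base, 'N') for base in reversed(sequence))
--
-- def has_potential_orf(sequence, min_orf_length=300):
--     """Check if sequence has potential open reading frames.
--
--     Single linear scan per frame: between stop codons only the EARLIEST
--     pending start codon matters (it maximises the distance to the next
--     in-frame stop), so one pass per frame suffices."""
--     sequence = sequence.upper()
--     start_codons = {'ATG', 'GTG', 'TTG'}
--     stop_codons = {'TAA', 'TAG', 'TGA'}
--     for strand in (sequence, reverse_complement(sequence)):
--         n = len(strand)
--         for frame in range(3):
--             earliest = None
--             for p in range(frame, n - 2, 3):
--                 codon = strand[p:p + 3]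
--                 if codon in stop_codons:
--                     if earliest is not None and p - earliest >= min_orf_length:
--                         return True
--                     earliest = None
--                 elif codon in start_codons and earliest is None:
--                     earliest = p
--     return False
-- ===== Notes on version B (the rewrite author's own statement) =====
-- stated objective: faster
-- what changed: Replaced the per-start rescan for the next in-frame stop codon (quadratic in the worst case) by a single linear scan per frame that tracks only the earliest pending start codon between stop codons.
import Mathlib
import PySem

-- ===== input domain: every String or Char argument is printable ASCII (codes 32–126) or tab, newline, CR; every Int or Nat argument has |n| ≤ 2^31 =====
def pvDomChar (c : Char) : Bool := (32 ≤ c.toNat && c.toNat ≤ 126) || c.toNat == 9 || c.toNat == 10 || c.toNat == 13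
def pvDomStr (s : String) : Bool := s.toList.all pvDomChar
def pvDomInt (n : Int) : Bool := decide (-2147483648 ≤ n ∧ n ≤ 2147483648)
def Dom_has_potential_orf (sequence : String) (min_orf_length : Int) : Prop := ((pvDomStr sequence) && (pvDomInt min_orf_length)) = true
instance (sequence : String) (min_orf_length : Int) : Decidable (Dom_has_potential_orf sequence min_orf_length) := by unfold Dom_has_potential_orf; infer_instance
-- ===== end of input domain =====

-- B replaces A's per-start rescan for the next in-frame stop codon by one linear
-- scan per frame tracking the earliest pending start codon (O(n) vs O(n^2) worst case).

-- ===== PORT A =====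

-- helper of both Pythons: reverse_complement (''.join over chars ported as String.ofList ∘ map — exact)
def pvComplement : PySem.Dict Char Char :=
  PySem.Dict.ofList [('A', 'T'), ('T', 'A'), ('G', 'C'), ('C', 'G'), ('N', 'N')]

def pvReverseComplement (sequence : String) : String :=
  String.ofList (sequence.toList.reverse.map (fun base => PySem.Dict.getD pvComplement base 'N'))

def pvStartCodons : List String := ["ATG", "GTG", "TTG"]
def pvStopCodons : List String := ["TAA", "TAG", "TGA"]

-- A's inner loop: for stop_pos in range(start_pos+3, len-2, 3) with return/break
def pvA_inner (s : String) (m start : Int) : List Int → Bool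
  | [] => false
  | q :: rest =>
    let stop_codon := PySem.Str.slice s (some q) (some (q + 3))
    if PySem.Str.len stop_codon = 3 ∧ stop_codon ∈ pvStopCodons then
      decide (q - start ≥ m)          -- return True if long enough, else break
    else pvA_inner s m start rest

-- A's outer loop over one strand and frame: for start_pos in range(frame, len-2, 3)
def pvA_outer (s : String) (n m : Int) : List Int → Bool
  | [] => false
  | p :: rest =>
    let codon := PySem.Str.slice s (some p) (some (p + 3))
    if PySem.Str.len codon = 3 ∧ codon ∈ pvStartCodons then
      if pvA_inner s m p (PySem.List.pyRange (p + 3) (n - 2) 3) then true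
      else pvA_outer s n m rest
    else pvA_outer s n m rest

-- A's frame loop: forward strand, then reverse strand (recomputed each frame, as in A)
def pvA_frames (s : String) (m : Int) : List Int → Bool
  | [] => false
  | f :: rest =>
    if pvA_outer s (PySem.Str.len s) m (PySem.List.pyRange f (PySem.Str.len s - 2) 3) then true
    else
      let rev := pvReverseComplement s
      if pvA_outer rev (PySem.Str.len rev) m (PySem.List.pyRange f (PySem.Str.len rev - 2) 3) then true
      else pvA_frames s m rest

def has_potential_orf (sequence : String) (min_orf_length : Int) : Bool :=
  pvA_frames (PySem.Str.upper sequence) min_orf_length (PySem.List.pyRange 0 3 1)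

-- ===== PORT B =====

-- B's single scan per frame: earliest pending start codon between stop codons
def pvB_scan (s : String) (m : Int) : List Int → Option Int → Bool
  | [], _ => false
  | p :: rest, earliest =>
    let codon := PySem.Str.slice s (some p) (some (p + 3))
    if codon ∈ pvStopCodons then
      match earliest with
      | some e => if p - e ≥ m then true else pvB_scan s m rest none
      | none => pvB_scan s m rest none
    else if codon ∈ pvStartCodons ∧ earliest = none then pvB_scan s m rest (some p)
    else pvB_scan s m rest earliest

def pvB_frames (s : String) (m : Int) : List Int → Bool
  | [] => false
  | f :: rest =>
    if pvB_scan s m (PySem.List.pyRange f (PySem.Str.len s - 2) 3) none then true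
    else pvB_frames s m rest

def pvB_strands (m : Int) : List String → Bool
  | [] => false
  | s :: rest =>
    if pvB_frames s m (PySem.List.pyRange 0 3 1) then true else pvB_strands m rest

def has_potential_orf_alt (sequence : String) (min_orf_length : Int) : Bool :=
  let s := PySem.Str.upper sequence
  pvB_strands min_orf_length [s, pvReverseComplement s]

-- ===== PRECONDITION & SPEC =====
def Spec_has_potential_orf (sequence : String) (min_orf_length : Int) (out : Bool) : Prop := out = has_potential_orf_alt sequence min_orf_length
instance (sequence : String) (min_orf_length : Int) (out : Bool) : Decidable (Spec_has_potential_orf sequence min_orf_length out) := by unfold Spec_has_potential_orf; infer_instance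

-- ===== CLAIM (what is proved, stated in full; the proofs are below) =====
def Claim_equal_has_potential_orf : Prop := ∀ (sequence : String) (min_orf_length : Int), Dom_has_potential_orf sequence min_orf_length → Spec_has_potential_orf sequence min_orf_length (has_potential_orf sequence min_orf_length)

-- ===== LEMMAS AND PROOFS =====

-- step-3 range unfolds like a cons list
theorem pvRange3_cons (a b : Int) (h : a < b) :
    PySem.List.pyRange a b 3 = a :: PySem.List.pyRange (a + 3) b 3 := by
  rw [PySem.List.pyRange_of_pos _ _ (by norm_num), PySem.List.pyRange_of_pos _ _ (by norm_num)]
  have hc : (if a < b then ((b - a + 3 - 1) / 3).toNat else 0)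
      = (if a + 3 < b then ((b - (a + 3) + 3 - 1) / 3).toNat else 0) + 1 := by
    split_ifs <;> omega
  rw [hc, List.range_succ_eq_map, List.map_cons, List.map_map]
  congr 1
  · norm_num
  · refine List.map_congr_left (fun k _ => ?_)
    simp only [Function.comp_apply]
    push_cast
    ring

theorem pvRange3_nil (a b : Int) (h : b ≤ a) : PySem.List.pyRange a b 3 = [] := by
  rw [PySem.List.pyRange_of_pos _ _ (by norm_num)]
  simp [show ¬ a < b by omega]

-- a stop codon is never a start codon, and both have length 3
theorem pvStop_not_start {c : String} (h : c ∈ pvStopCodons) : c ∉ pvStartCodons := by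
  simp only [pvStopCodons, List.mem_cons, List.not_mem_nil, or_false] at h
  rcases h with rfl | rfl | rfl <;> decide

theorem pvStop_len {c : String} (h : c ∈ pvStopCodons) : PySem.Str.len c = 3 := by
  simp only [pvStopCodons, List.mem_cons, List.not_mem_nil, or_false] at h
  rcases h with rfl | rfl | rfl <;> decide

theorem pvStart_len {c : String} (h : c ∈ pvStartCodons) : PySem.Str.len c = 3 := by
  simp only [pvStartCodons, List.mem_cons, List.not_mem_nil, or_false] at h
  rcases h with rfl | rfl | rfl <;> decide

-- an earlier start only lengthens the ORF to the same first stop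
theorem pvA_inner_mono (s : String) (m e p : Int) (hep : e ≤ p) (L : List Int)
    (h : pvA_inner s m p L = true) : pvA_inner s m e L = true := by
  induction L with
  | nil => simp [pvA_inner] at h
  | cons q rest ih =>
    simp only [pvA_inner] at h ⊢
    split_ifs at h ⊢ with hc
    · simp only [decide_eq_true_eq] at h ⊢
      omega
    · exact ih h

-- core: B's one-pass scan equals A's nested scan, on any step-3 range
theorem pvCore (s : String) (n m : Int) : ∀ (k : Nat) (a : Int) (b : Option Int),
    (PySem.List.pyRange a (n - 2) 3).length = k →
    (∀ e, b = some e → e ≤ a) →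
    pvB_scan s m (PySem.List.pyRange a (n - 2) 3) b =
      ((match b with
        | some e => pvA_inner s m e (PySem.List.pyRange a (n - 2) 3)
        | none => false) || pvA_outer s n m (PySem.List.pyRange a (n - 2) 3)) := by
  intro k
  induction k with
  | zero =>
    intro a b hlen hb
    rw [List.length_eq_zero_iff] at hlen
    rw [hlen]
    cases b <;> simp [pvB_scan, pvA_inner, pvA_outer]
  | succ k ih =>
    intro a b hlen hb
    have hab : a < n - 2 := by
      by_contra hx
      rw [pvRange3_nil _ _ (by omega)] at hlen
      simp at hlen
    rw [pvRange3_cons _ _ hab] at hlen ⊢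
    simp only [List.length_cons, Nat.add_right_cancel_iff] at hlen
    by_cases hstop : PySem.Str.slice s (some a) (some (a + 3)) ∈ pvStopCodons
    · have hns : ¬ (PySem.Str.len (PySem.Str.slice s (some a) (some (a + 3))) = 3 ∧
          PySem.Str.slice s (some a) (some (a + 3)) ∈ pvStartCodons) :=
        fun hx => pvStop_not_start hstop hx.2
      cases b with
      | none =>
        simp only [pvB_scan, pvA_outer, if_pos hstop, if_neg hns]
        rw [ih (a + 3) none hlen (by simp)]
      | some e =>
        simp only [pvB_scan, pvA_outer, pvA_inner, if_pos hstop,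
          if_pos (And.intro (pvStop_len hstop) hstop), if_neg hns]
        rw [ih (a + 3) none hlen (by simp), Bool.false_or]
        by_cases hm : a - e ≥ m
        · simp [hm]
        · simp [hm]
    · by_cases hstart : PySem.Str.slice s (some a) (some (a + 3)) ∈ pvStartCodons
      · have hys : (PySem.Str.len (PySem.Str.slice s (some a) (some (a + 3))) = 3 ∧
            PySem.Str.slice s (some a) (some (a + 3)) ∈ pvStartCodons) :=
          ⟨pvStart_len hstart, hstart⟩
        cases b with
        | none =>
          simp only [pvB_scan, pvA_outer, if_neg hstop, if_pos hys,
            and_true, if_pos hstart]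
          rw [ih (a + 3) (some a) hlen (by intro e he; injection he with he; omega)]
          cases hi : pvA_inner s m a (PySem.List.pyRange (a + 3) (n - 2) 3) <;> simp [hi]
        | some e =>
          have hea : e ≤ a := hb e rfl
          have hne : ¬ (PySem.Str.slice s (some a) (some (a + 3)) ∈ pvStartCodons ∧
              (some e : Option Int) = none) := fun hx => by simp at hx
          simp only [pvB_scan, pvA_outer, pvA_inner, if_neg hstop, if_pos hys, if_neg hne,
            if_neg (fun hx : PySem.Str.len _ = 3 ∧ _ ∈ pvStopCodons => hstop hx.2)]
          rw [ih (a + 3) (some e) hlen (by intro e' he'; injection he' with he'; omega)]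
          cases hi : pvA_inner s m a (PySem.List.pyRange (a + 3) (n - 2) 3)
          · simp
          · have := pvA_inner_mono s m e a hea _ hi
            simp [this]

      · have hns : ¬ (PySem.Str.len (PySem.Str.slice s (some a) (some (a + 3))) = 3 ∧
            PySem.Str.slice s (some a) (some (a + 3)) ∈ pvStartCodons) :=
          fun hx => hstart hx.2
        have hnb : ¬ (PySem.Str.slice s (some a) (some (a + 3)) ∈ pvStartCodons ∧ b = none) :=
          fun hx => hstart hx.1
        cases b with
        | none =>
          simp only [pvB_scan, pvA_outer, if_neg hstop, if_neg hns,
            and_true, if_neg hstart]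
          rw [ih (a + 3) none hlen (by simp)]
        | some e =>
          have hea : e ≤ a := hb e rfl
          simp only [pvB_scan, pvA_outer, pvA_inner, if_neg hstop, if_neg hns, if_neg hnb,
            if_neg (fun hx : PySem.Str.len _ = 3 ∧ _ ∈ pvStopCodons => hstop hx.2)]
          exact ih (a + 3) (some e) hlen (by intro e' he'; injection he' with he'; omega)

theorem pvScan_eq_outer (s : String) (m f : Int) :
    pvB_scan s m (PySem.List.pyRange f (PySem.Str.len s - 2) 3) none =
      pvA_outer s (PySem.Str.len s) m (PySem.List.pyRange f (PySem.Str.len s - 2) 3) := by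
  rw [pvCore s (PySem.Str.len s) m (PySem.List.pyRange f (PySem.Str.len s - 2) 3).length f none
    rfl (by simp)]
  simp

-- ===== VERDICT (by name: the statement is the Claim_ definition above) =====
theorem has_potential_orf_spec : Claim_equal_has_potential_orf := by
  intro seq m _
  unfold Spec_has_potential_orf has_potential_orf has_potential_orf_alt
  have h3 : PySem.List.pyRange 0 3 1 = [0, 1, 2] := by decide
  simp only [h3, pvA_frames, pvB_strands, pvB_frames]
  rw [pvScan_eq_outer, pvScan_eq_outer, pvScan_eq_outer, pvScan_eq_outer, pvScan_eq_outer,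
    pvScan_eq_outer]
  set u := PySem.Str.upper seq
  set r := pvReverseComplement u
  set x0 := pvA_outer u (PySem.Str.len u) m (PySem.List.pyRange 0 (PySem.Str.len u - 2) 3)
  set x1 := pvA_outer u (PySem.Str.len u) m (PySem.List.pyRange 1 (PySem.Str.len u - 2) 3)
  set x2 := pvA_outer u (PySem.Str.len u) m (PySem.List.pyRange 2 (PySem.Str.len u - 2) 3)
  set y0 := pvA_outer r (PySem.Str.len r) m (PySem.List.pyRange 0 (PySem.Str.len r - 2) 3)
  set y1 := pvA_outer r (PySem.Str.len r) m (PySem.List.pyRange 1 (PySem.Str.len r - 2) 3)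
  set y2 := pvA_outer r (PySem.Str.len r) m (PySem.List.pyRange 2 (PySem.Str.len r - 2) 3)
  cases x0 <;> cases x1 <;> cases x2 <;> cases y0 <;> cases y1 <;> cases y2 <;> simp
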